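-- pv_equiv track=rewrite | github.com/nalangekrushna/comprinno_test | 7.py | get_rectangle_area
-- ===== SOURCE A (Python) =====
-- def get_rectangle_area(sticks) :
--     stick_count = {}
--     for i in sticks :
--         if i in stick_count :
--             stick_count[i] += 1
--         else :
--             stick_count[i] = 1
--     # filter only sticks having atleast two sticks of same length.
--     stick_count = { k:v for k,v in stick_count.items() if v > 1 }
--     # if all sticks are of same length and are atmax 3 so can't create rectangle.
--     if len(stick_count) == 1 and list(stick_count.values())[0] <= 3 :
--         return -1
--     # if all sticks are of same length and are atleast 4 then special case of rectange square will form.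
--     elif len(stick_count) == 1 and list(stick_count.values())[0] > 3 :
--         return list(stick_count.keys())[0]**2
--     # if there are atleast sticks of two lenghts
--     elif len(stick_count) > 1 :
--         # sort them by highest to lowest using their count.
--         two_elements = sorted(stick_count.keys(),reverse=True)[:2]
--         # If atleast 4 elements are present then use that element only.
--         if stick_count[two_elements[0]] > 3 :
--             return two_elements[0]**2
--         else :
--             # take highest and second highest element.
--             return two_elements[0]*two_elements[1]
-- ===== SOURCE B (Python) =====
-- def get_rectangle_area(sticks):
--     count = {}
--     for s in sticks:
--         count[s] = count.get(s, 0) + 1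
--     n = 0
--     best1 = None  # (length, count) of the largest length occurring > 1 times
--     best2 = None  # second largest length occurring > 1 times
--     for k, v in count.items():
--         if v > 1:
--             n += 1
--             if best1 is None or k > best1[0]:
--                 if best1 is not None:
--                     best2 = best1[0]
--                 best1 = (k, v)
--             elif best2 is None or k > best2:
--                 best2 = k
--     if n == 0:
--         return None
--     if best1[1] > 3:
--         return best1[0] ** 2
--     if n == 1:
--         return -1
--     return best1[0] * best2
-- ===== Notes on version B (the rewrite author's own statement) =====
-- stated objective: alternative
-- what changed: Replaces A's dict-comprehension filter plus reverse sort of the qualifying lengths by a single linear scan over the counter items that keeps the two largest lengths with count>1 (together with the top length's count) and how many qualify, then decides the same branches from that state.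
import Mathlib
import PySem

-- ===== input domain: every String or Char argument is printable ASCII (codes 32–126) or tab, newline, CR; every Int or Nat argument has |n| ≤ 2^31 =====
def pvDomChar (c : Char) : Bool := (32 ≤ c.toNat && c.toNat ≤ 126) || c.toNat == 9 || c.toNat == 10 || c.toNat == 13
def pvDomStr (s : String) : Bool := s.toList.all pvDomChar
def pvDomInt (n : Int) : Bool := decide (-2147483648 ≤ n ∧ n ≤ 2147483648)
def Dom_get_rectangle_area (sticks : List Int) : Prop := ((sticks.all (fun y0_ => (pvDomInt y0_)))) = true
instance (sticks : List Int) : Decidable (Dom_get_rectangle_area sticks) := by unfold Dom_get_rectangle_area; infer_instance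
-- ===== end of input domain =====

-- B replaces A's dict-comprehension filter + reverse sort of the qualifying lengths by one
-- linear scan keeping the two largest lengths whose count exceeds 1 (objective: alternative).

-- ===== PORT A =====
def get_rectangle_area (sticks : List Int) : Option Int :=
  let cnt := sticks.foldl
    (fun d i => if d.contains i then d.modify i 0 (· + 1) else d.insert i 1)
    PySem.Dict.empty
  -- stick_count = { k:v for k,v in stick_count.items() if v > 1 }
  let fd : PySem.Dict Int Int := PySem.Dict.mk (cnt.items.filter (fun p => decide (1 < p.2)))
  -- list(...)[0] is read only under the `size = 1` guard, so headD is exact there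
  if fd.size = 1 ∧ fd.values.headD 0 ≤ 3 then
    some (-1)
  else if fd.size = 1 ∧ 3 < fd.values.headD 0 then
    some (fd.keys.headD 0 ^ 2)
  else if 1 < fd.size then
    -- two_elements = sorted(stick_count.keys(), reverse=True)[:2]; the two indexings
    -- are realized by the match (size > 1 guarantees two elements; the `_` arm,
    -- where Python would raise IndexError, is unreachable)
    match (PySem.List.sorted fd.keys (fun x => x) true).take 2 with
    | a :: b :: _ => if 3 < fd.getD a 0 then some (a ^ 2) else some (a * b)
    | _ => none
  else
    none

-- ===== PORT B =====
-- loop body of Source B's scan for one item p = (k, v), on state (n, best1, best2)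
def bStep (st : Int × Option (Int × Int) × Option Int) (p : Int × Int) :
    Int × Option (Int × Int) × Option Int :=
  match st with
  | (n, none, b2) => (n + 1, some p, b2)
  | (n, some b1, b2) =>
    if b1.1 < p.1 then (n + 1, some p, some b1.1)
    else
      match b2 with
      | none => (n + 1, some b1, some p.1)
      | some k2 => if k2 < p.1 then (n + 1, some b1, some p.1) else (n + 1, some b1, some k2)

-- the `if v > 1` guard of Source B's loop
def altStep (st : Int × Option (Int × Int) × Option Int) (p : Int × Int) :
    Int × Option (Int × Int) × Option Int :=
  if 1 < p.2 then bStep st p else st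

def get_rectangle_area_alt (sticks : List Int) : Option Int :=
  let cnt := sticks.foldl (fun d s => d.insert s (d.getD s 0 + 1)) PySem.Dict.empty
  match cnt.items.foldl altStep ((0 : Int), (none : Option (Int × Int)), (none : Option Int)) with
  | (n, b1, b2) =>
    if n = 0 then none
    else
      match b1 with
      | none => none   -- unreachable: n ≠ 0 forces best1 ≠ None
      | some p1 =>
        if 3 < p1.2 then some (p1.1 ^ 2)
        else if n = 1 then some (-1)
        else
          match b2 with
          | some k2 => some (p1.1 * k2)
          | none => none   -- unreachable: n ≥ 2 forces best2 ≠ None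

-- ===== PRECONDITION & SPEC =====
def Spec_get_rectangle_area (sticks : List Int) (out : Option Int) : Prop := out = get_rectangle_area_alt sticks
instance (sticks : List Int) (out : Option Int) : Decidable (Spec_get_rectangle_area sticks out) := by unfold Spec_get_rectangle_area; infer_instance

-- ===== CLAIM (what is proved, stated in full; the proofs are below) =====
def Claim_equal_get_rectangle_area : Prop := ∀ (sticks : List Int), Dom_get_rectangle_area sticks → Spec_get_rectangle_area sticks (get_rectangle_area sticks)

-- ===== LEMMAS AND PROOFS =====

-- A's manual counting loop builds exactly collections.Counter(sticks)
lemma countA_eq_counter (sticks : List Int) :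
    sticks.foldl
      (fun d i => if d.contains i then d.modify i 0 (· + 1) else d.insert i 1)
      PySem.Dict.empty = PySem.Dict.counter sticks := by
  have hf : (fun (d : PySem.Dict Int Int) i => if d.contains i then d.modify i 0 (· + 1) else d.insert i 1)
      = (fun d x => d.modify x 0 (· + 1)) := by
    funext d i
    by_cases h : d.contains i = true
    · simp [h]
    · simp only [Bool.not_eq_true] at h
      have hg : d.getD i 0 = 0 := PySem.Dict.getD_of_not_contains d 0 h
      simp [h, PySem.Dict.modify, PySem.Dict.insert, hg]
  rw [hf, PySem.Dict.counter_eq_foldl]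


-- B's counting loop is the Counter-building loop of the prelude
lemma countB_eq_counter (sticks : List Int) :
    sticks.foldl (fun d s => d.insert s (d.getD s 0 + 1)) PySem.Dict.empty
      = PySem.Dict.counter sticks :=
  PySem.Dict.foldl_insert_getD_add_one_eq_counter sticks


-- the first two elements of the reverse-sorted key list are the max and the second max
lemma sorted_take_two (keys : List Int) (hnd : keys.Nodup) (k1 k2 : Int)
    (h1 : k1 ∈ keys) (hmax : ∀ k ∈ keys, k ≤ k1) (h2 : k2 ∈ keys) (hlt : k2 < k1)
    (hsec : ∀ k ∈ keys, k ≠ k1 → k ≤ k2) :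
    ∃ rest, PySem.List.sorted keys (fun x => x) true = k1 :: k2 :: rest := by
  have hperm : (PySem.List.sorted keys (fun x => x) true).Perm keys :=
    PySem.List.sorted_perm keys (fun x => x) true
  have hpw : (PySem.List.sorted keys (fun x => x) true).Pairwise (fun a b => b ≤ a) :=
    PySem.List.sorted_pairwise_rev keys (fun x => x)
  have hndS : (PySem.List.sorted keys (fun x => x) true).Nodup := hperm.nodup_iff.mpr hnd
  match hS : PySem.List.sorted keys (fun x => x) true with
  | [] =>
    exfalso; rw [hS] at hperm; exact absurd (hperm.symm.mem_iff.mp h1) (List.not_mem_nil)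
  | [a] =>
    exfalso; rw [hS] at hperm
    have e1 : k1 = a := List.eq_of_mem_singleton (hperm.symm.mem_iff.mp h1)
    have e2 : k2 = a := List.eq_of_mem_singleton (hperm.symm.mem_iff.mp h2)
    omega
  | a :: b :: t =>
    rw [hS] at hperm hpw hndS
    have hamem : a ∈ keys := hperm.mem_iff.mp List.mem_cons_self
    have hge : ∀ y ∈ keys, y ≤ a := by
      intro y hy
      exact PySem.List.key_head_sorted_rev_ge _ _ hS y hy
    have ha : a = k1 := le_antisymm (hmax a hamem) (hge k1 h1)
    have hbt : (b :: t).Pairwise (fun x y => y ≤ x) := (List.pairwise_cons.mp hpw).2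
    have hb_le : ∀ y ∈ b :: t, y ≤ b := by
      intro y hy
      rcases List.mem_cons.mp hy with h | h
      · omega
      · exact (List.pairwise_cons.mp hbt).1 y h
    have hbmem : b ∈ keys := hperm.mem_iff.mp (List.mem_cons_of_mem _ List.mem_cons_self)
    have hne : b ≠ a := by
      intro h; exact (List.nodup_cons.mp hndS).1 (h ▸ List.mem_cons_self)
    have hk2mem : k2 ∈ a :: b :: t := hperm.symm.mem_iff.mp h2
    have hk2bt : k2 ∈ b :: t := by
      rcases List.mem_cons.mp hk2mem with h | h
      · exfalso; omega
      · exact h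
    have hb : b = k2 := le_antisymm (hsec b hbmem (by rw [ha] at hne; exact hne)) (hb_le k2 hk2bt)
    subst ha; subst hb; exact ⟨t, rfl⟩

def ScanInv (L : List (Int × Int)) (st : Int × Option (Int × Int) × Option Int) : Prop :=
  st.1 = L.length ∧
  (st.2.1 = none ↔ L = []) ∧
  (∀ k1 v1, st.2.1 = some (k1, v1) → (k1, v1) ∈ L ∧ ∀ p ∈ L, p.1 ≤ k1) ∧
  (st.2.2 = none ↔ L.length ≤ 1) ∧
  (∀ k2 k1 v1, st.2.2 = some k2 → st.2.1 = some (k1, v1) →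
     k2 ∈ L.map Prod.fst ∧ k2 < k1 ∧ ∀ p ∈ L, p.1 ≠ k1 → p.1 ≤ k2)

theorem scan_inv (L : List (Int × Int)) (hnd : (L.map Prod.fst).Nodup) :
    ScanInv L (L.foldl bStep ((0 : Int), none, none)) := by
  induction L using List.reverseRecOn with
  | nil => exact ⟨rfl, by simp, by simp, by simp, by simp⟩
  | append_singleton L q ih =>
    rw [List.map_append, List.map_singleton, List.nodup_append] at hnd
    obtain ⟨hndL, -, hdisj⟩ := hnd
    have hqnot : q.1 ∉ L.map Prod.fst := by
      intro h
      exact hdisj q.1 h q.1 (List.mem_singleton_self _) rfl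
    have inv := ih hndL
    rw [List.foldl_append, List.foldl_cons, List.foldl_nil]
    obtain ⟨hn, hb1none, hb1, hb2none, hb2⟩ := inv
    set st := L.foldl bStep ((0 : Int), none, none) with hst
    obtain ⟨n, b1, b2⟩ := st
    simp only at hn hb1none hb1 hb2none hb2
    cases b1 with
    | none =>
      have hL : L = [] := hb1none.mp rfl
      subst hL
      have hb2' : b2 = none := hb2none.mpr (by simp)
      subst hb2'
      refine ⟨by simp [bStep, hn], by simp [bStep], ?_, by simp [bStep], by simp [bStep]⟩
      intro k1 v1 h
      simp only [bStep, Option.some.injEq] at h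
      subst h
      exact ⟨by simp, by simp⟩
    | some b1v =>
      obtain ⟨hmem1, hmax1⟩ := hb1 b1v.1 b1v.2 (by rfl)
      have hk1mem : b1v.1 ∈ L.map Prod.fst := List.mem_map_of_mem hmem1
      have hqne : q.1 ≠ b1v.1 := fun h => hqnot (h ▸ hk1mem)
      have hLne : L ≠ [] := fun h => by simp [h] at hmem1
      by_cases hgt : b1v.1 < q.1
      · -- q becomes the new max, old max becomes second
        simp only [bStep, if_pos hgt]
        refine ⟨by simp [hn], ?_, ?_, ?_, ?_⟩
        · constructor
          · intro h; simp at h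
          · intro h; simp at h
        · intro k1 v1 h
          simp only [Option.some.injEq] at h
          subst h
          constructor
          · simp
          · intro p hp
            rcases List.mem_append.mp hp with h' | h'
            · have := hmax1 p h'; simp; omega
            · simp only [List.mem_singleton] at h'; simp [h']
        · constructor
          · intro h; simp at h
          · intro h; simp at h; exact absurd h hLne
        · intro k2 k1 v1 h2 h1
          simp only [Option.some.injEq] at h2 h1
          subst h1; subst h2
          refine ⟨by rw [List.map_append]; exact List.mem_append_left _ hk1mem,
                  by simpa using hgt, ?_⟩
          intro p hp hne
          rcases List.mem_append.mp hp with h' | h'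
          · exact hmax1 p h'
          · simp only [List.mem_singleton] at h'
            exfalso; rw [h'] at hne; simp at hne
      · have hqlt : q.1 < b1v.1 := lt_of_le_of_ne (le_of_not_gt hgt) hqne
        cases b2 with
        | none =>
          have hlen1 : L.length ≤ 1 := hb2none.mp rfl
          have hL : L = [b1v] := by
            cases L with
            | nil => exact absurd rfl hLne
            | cons x xs =>
              cases xs with
              | nil =>
                simp only [List.mem_singleton] at hmem1
                rw [← hmem1]
              | cons y ys => simp at hlen1
          simp only [bStep, if_neg hgt]
          refine ⟨by simp [hn], ?_, ?_, ?_, ?_⟩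
          · constructor
            · intro h; simp at h
            · intro h; simp at h
          · intro k1 v1 h
            simp only [Option.some.injEq] at h
            have hk : k1 = b1v.1 := by rw [h]
            constructor
            · exact List.mem_append_left _ (by rw [← h]; exact hmem1)
            · intro p hp
              rcases List.mem_append.mp hp with h' | h'
              · have := hmax1 p h'; omega
              · simp only [List.mem_singleton] at h'; rw [h', hk]; omega
          · constructor
            · intro h; simp at h
            · intro h; simp at h; exact absurd h hLne
          · intro k2 k1 v1 h2 h1
            simp only [Option.some.injEq] at h2 h1
            have hk : k1 = b1v.1 := by rw [h1]
            subst h2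
            refine ⟨by rw [List.map_append]; exact List.mem_append_right _ (by simp),
                    by rw [hk]; exact hqlt, ?_⟩
            intro p hp hne
            rcases List.mem_append.mp hp with h' | h'
            · exfalso
              rw [hL] at h'; simp only [List.mem_singleton] at h'
              rw [h', hk] at hne; simp at hne
            · simp only [List.mem_singleton] at h'; rw [h']
        | some k2v =>
          have hlen2 : ¬ (L.length ≤ 1) := fun h => by simpa using hb2none.mpr h
          obtain ⟨hk2mem, hk2lt, hk2sec⟩ := hb2 k2v b1v.1 b1v.2 rfl rfl
          by_cases hq2 : k2v < q.1
          · simp only [bStep, if_neg hgt, if_pos hq2]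
            refine ⟨by simp [hn], ?_, ?_, ?_, ?_⟩
            · constructor
              · intro h; simp at h
              · intro h; simp at h
            · intro k1 v1 h
              simp only [Option.some.injEq] at h
              have hk : k1 = b1v.1 := by rw [h]
              constructor
              · exact List.mem_append_left _ (by rw [← h]; exact hmem1)
              · intro p hp
                rcases List.mem_append.mp hp with h' | h'
                · have := hmax1 p h'; omega
                · simp only [List.mem_singleton] at h'; rw [h', hk]; omega
            · constructor
              · intro h; simp at h
              · intro h; simp at h; exact absurd h hLne
            · intro k2 k1 v1 h2 h1
              simp only [Option.some.injEq] at h2 h1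
              have hk : k1 = b1v.1 := by rw [h1]
              subst h2
              refine ⟨by rw [List.map_append]; exact List.mem_append_right _ (by simp),
                      by rw [hk]; exact hqlt, ?_⟩
              intro p hp hne
              rcases List.mem_append.mp hp with h' | h'
              · have := hk2sec p h' (by rw [← hk]; exact hne); omega
              · simp only [List.mem_singleton] at h'; rw [h']
          · simp only [bStep, if_neg hgt, if_neg hq2]
            have hqlek2 : q.1 ≤ k2v := le_of_not_gt hq2
            refine ⟨by simp [hn], ?_, ?_, ?_, ?_⟩
            · constructor
              · intro h; simp at h
              · intro h; simp at h
            · intro k1 v1 h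
              simp only [Option.some.injEq] at h
              have hk : k1 = b1v.1 := by rw [h]
              constructor
              · exact List.mem_append_left _ (by rw [← h]; exact hmem1)
              · intro p hp
                rcases List.mem_append.mp hp with h' | h'
                · have := hmax1 p h'; omega
                · simp only [List.mem_singleton] at h'; rw [h', hk]; omega
            · constructor
              · intro h; simp at h
              · intro h; simp at h; exact absurd h hLne
            · intro k2 k1 v1 h2 h1
              simp only [Option.some.injEq] at h2 h1
              have hk : k1 = b1v.1 := by rw [h1]
              subst h2
              refine ⟨by rw [List.map_append]; exact List.mem_append_left _ hk2mem,
                      by rw [hk]; exact hk2lt, ?_⟩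
              intro p hp hne
              rcases List.mem_append.mp hp with h' | h'
              · exact hk2sec p h' (by rw [← hk]; exact hne)
              · simp only [List.mem_singleton] at h'; rw [h']; omega


lemma ports_agree (sticks : List Int) :
    get_rectangle_area sticks = get_rectangle_area_alt sticks := by
  simp only [get_rectangle_area, get_rectangle_area_alt]
  rw [countA_eq_counter, countB_eq_counter]
  set M := (PySem.Dict.counter sticks).items with hM
  set L := M.filter (fun p => decide (1 < p.2)) with hL
  have hfoldB : M.foldl altStep ((0 : Int), (none : Option (Int × Int)), (none : Option Int))
      = L.foldl bStep ((0 : Int), none, none) := by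
    rw [hL, List.foldl_filter]
    congr 1
    funext st p0
    simp [altStep]
  have hndM : (M.map Prod.fst).Nodup := PySem.Dict.nodup_keys_counter sticks
  have hsub : L.Sublist M := List.filter_sublist
  have hnd : (L.map Prod.fst).Nodup := hndM.sublist (hsub.map Prod.fst)
  rw [hfoldB]
  have inv := scan_inv L hnd
  cases hLc : L with
  | nil => simp [PySem.Dict.size]
  | cons p t =>
    cases hTc : t with
    | nil =>
      subst hTc
      have hb : List.foldl bStep ((0:Int), none, none) [p] = (1, some p, none) := rfl
      rw [hb]
      by_cases h3 : 3 < p.2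
      · simp [h3, PySem.Dict.size, not_le.mpr h3]
      · simp [h3, not_lt.mp h3, PySem.Dict.size]
    | cons q r =>
      subst hTc
      rw [hLc] at inv
      obtain ⟨hn, hb1none, hb1, hb2none, hb2⟩ := inv
      set st := (p :: q :: r).foldl bStep ((0:Int), none, none) with hst
      obtain ⟨n, b1, b2⟩ := st
      simp only at hn hb1none hb1 hb2none hb2
      cases b1 with
      | none => exact absurd (hb1none.mp rfl) (by simp)
      | some b1v =>
        cases b2 with
        | none => have := hb2none.mp rfl; simp at this
        | some k2v =>
          obtain ⟨hmem1, hmax1⟩ := hb1 b1v.1 b1v.2 rfl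
          obtain ⟨hk2mem, hk2lt, hk2sec⟩ := hb2 k2v b1v.1 b1v.2 rfl rfl
          -- keys facts
          have hkeys : (PySem.Dict.mk (p :: q :: r) : PySem.Dict Int Int).keys
              = (p :: q :: r).map Prod.fst := rfl
          have hndk : ((p :: q :: r).map Prod.fst).Nodup := by rw [← hLc]; exact hnd
          have hmaxk : ∀ k ∈ (p :: q :: r).map Prod.fst, k ≤ b1v.1 := by
            intro k hk
            obtain ⟨pp, hpp, hke⟩ := List.mem_map.mp hk
            rw [← hke]; exact hmax1 pp hpp
          have hseck : ∀ k ∈ (p :: q :: r).map Prod.fst, k ≠ b1v.1 → k ≤ k2v := by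
            intro k hk hne
            obtain ⟨pp, hpp, hke⟩ := List.mem_map.mp hk
            rw [← hke]; exact hk2sec pp hpp (by rw [hke]; exact hne)
          obtain ⟨rest, hsorted⟩ := sorted_take_two ((p :: q :: r).map Prod.fst) hndk b1v.1 k2v
            (List.mem_map_of_mem hmem1) hmaxk hk2mem hk2lt hseck
          have hgetD : (PySem.Dict.mk (p :: q :: r) : PySem.Dict Int Int).getD b1v.1 0 = b1v.2 :=
            PySem.Dict.getD_of_mem_items _ hmem1 hndk 0
          have hn2 : n = (r.length : Int) + 2 := by rw [hn]; simp; omega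
          have hsz : ¬ ((PySem.Dict.mk (p :: q :: r) : PySem.Dict Int Int).size = 1) := by
            simp [PySem.Dict.size]
          have hsz2 : 1 < (PySem.Dict.mk (p :: q :: r) : PySem.Dict Int Int).size := by
            simp [PySem.Dict.size]
          rw [hkeys, hsorted]  -- hmm keys inside sorted
          simp only [List.take, hsz, hsz2, false_and, if_false, if_pos, hgetD]
          have hnne0 : ¬ (n = 0) := by omega
          have hnne1 : ¬ (n = 1) := by omega
          by_cases h3 : 3 < b1v.2
          · simp [h3, hnne0]
          · simp [h3, hnne0, hnne1]


-- ===== VERDICT (by name: the statement is the Claim_ definition above) =====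
theorem get_rectangle_area_spec : Claim_equal_get_rectangle_area := by
  intro sticks _
  unfold Spec_get_rectangle_area
  exact ports_agree sticks
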